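-- pv_equiv track=rewrite | github.com/apricity2u/Algorithm | 프로그래머스/1/121683. ［PCCP 모의고사 #1］ 1번 － 외톨이 알파벳/［PCCP 모의고사 #1］ 1번 － 외톨이 알파벳.py | solution
-- ===== SOURCE A (Python) =====
-- def solution(input_string):
--
--     from collections import Counter
--
--     existed_alphabet = dict()
--
--     for idx, alphabet in enumerate(input_string):
--
--         if alphabet in existed_alphabet:
--             existed_alphabet[alphabet].append(idx)
--         else:
--             existed_alphabet[alphabet] = [idx]
--
--     loner = set()
--
--     for alphabet, index_list in existed_alphabet.items():
--
--         if len(index_list) == 1: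
--             continue
--
--         for idx, index in enumerate(index_list):
--
--             if idx > len(index_list) - 2:
--                 continue
--
--             if index + 1 != index_list[idx + 1]:
--                 loner.add(alphabet)
--
--     loner = list(loner)
--     loner.sort()
--     loner_string = ""
--
--     for idx, alphabet in enumerate(loner):
--
--         loner_string += alphabet
--
--         if (idx == len(loner) -1):
--             return loner_string
--
--     else:
--         return "N"
-- ===== SOURCE B (Python) =====
-- def solution(input_string):
--     last_seen = {}
--     loner = set()
--     for idx, ch in enumerate(input_string):
--         if ch in last_seen and idx != last_seen[ch] + 1:
--             loner.add(ch)
--         last_seen[ch] = idx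
--     return "".join(sorted(loner)) if loner else "N"
-- ===== Notes on version B (the rewrite author's own statement) =====
-- stated objective: simpler
-- what changed: One linear pass keeping only the previous index of each character in a dict (adding a character to the loner set the moment a non-adjacent repeat is seen), instead of building full per-character index lists in a dict and post-scanning every list with an indexed inner loop; output contract ('N' on empty, sorted join) unchanged.
import Mathlib
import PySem

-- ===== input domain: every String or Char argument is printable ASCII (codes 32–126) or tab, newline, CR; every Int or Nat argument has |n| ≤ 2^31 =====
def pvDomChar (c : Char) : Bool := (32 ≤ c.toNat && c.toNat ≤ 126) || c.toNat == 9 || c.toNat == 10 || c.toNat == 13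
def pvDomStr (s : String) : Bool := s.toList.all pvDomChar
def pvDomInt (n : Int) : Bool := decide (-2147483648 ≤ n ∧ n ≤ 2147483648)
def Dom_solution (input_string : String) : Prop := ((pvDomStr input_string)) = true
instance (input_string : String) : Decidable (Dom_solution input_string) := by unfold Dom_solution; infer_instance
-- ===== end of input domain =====

-- B replaces A's dict of full index lists and its nested post-scan by one linear pass that keeps
-- only each character's previous index (objective: simpler; same return value everywhere).

-- ===== PORT A =====
-- the final for/else loop of A, building loner_string and returning at the last index
-- (string concatenation is carried as a List Char accumulator, turned into a String at the
-- return points — exact for Python's str building)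
def solutionJoin (total : Int) (xs : List (Int × Char)) (acc : List Char) : String :=
  match xs with
  | [] => "N"
  | q :: rest =>
    let acc' := acc ++ [q.2]
    if q.1 = total - 1 then String.ofList acc' else solutionJoin total rest acc'

def solution (input_string : String) : String :=
  let existed : PySem.Dict Char (List Int) :=
    (PySem.List.enumerate input_string.toList 0).foldl
      (fun d p =>
        match d.get? p.2 with          -- 'if alphabet in existed_alphabet' + append / fresh list
        | some lst => d.insert p.2 (lst ++ [p.1])
        | none     => d.insert p.2 [p.1])
      PySem.Dict.empty
  let loner : PySem.Set Char :=
    existed.items.foldl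
      (fun st pr =>
        if (pr.2.length : Int) = 1 then st
        else
          (PySem.List.enumerate pr.2 0).foldl
            (fun st2 q =>
              if q.1 > (pr.2.length : Int) - 2 then st2
              else if q.2 + 1 ≠ PySem.List.pyGetD pr.2 (q.1 + 1) 0 then PySem.Set.add st2 pr.1
                   -- index_list[idx+1]: in range under the guard above, so pyGetD is exact
              else st2)
            st)
      PySem.Set.empty
  let lonerSorted := PySem.List.sorted loner (fun x => x) false
  solutionJoin (lonerSorted.length : Int) (PySem.List.enumerate lonerSorted 0) []

-- ===== PORT B =====
def solution_alt (input_string : String) : String :=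
  let fin :=
    (PySem.List.enumerate input_string.toList 0).foldl
      (fun (st : PySem.Dict Char Int × PySem.Set Char) p =>
        let loner := if st.1.contains p.2 ∧ p.1 ≠ st.1.getD p.2 0 + 1
                     -- last_seen[ch]: present under the 'ch in last_seen' guard, so getD is exact
                     then PySem.Set.add st.2 p.2 else st.2
        (st.1.insert p.2 p.1, loner))
      (PySem.Dict.empty, PySem.Set.empty)
  if fin.2 = [] then "N"
  else String.ofList (PySem.List.sorted fin.2 (fun x => x) false)

-- ===== PRECONDITION & SPEC =====
def Spec_solution (input_string : String) (out : String) : Prop := out = solution_alt input_string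
instance (input_string : String) (out : String) : Decidable (Spec_solution input_string out) := by unfold Spec_solution; infer_instance

-- ===== CLAIM (what is proved, stated in full; the proofs are below) =====
def Claim_equal_solution : Prop := ∀ (input_string : String), Dom_solution input_string → Spec_solution input_string (solution input_string)

-- ===== LEMMAS AND PROOFS =====

-- indices (as Python ints) at which c occurs in l
def occ (l : List Char) (c : Char) : List Int :=
  ((PySem.List.enumerate l 0).filter (fun p => p.2 == c)).map (fun p => p.1)

-- 'the occurrence indices are consecutive' (no loner gap)
def ok : List Int → Bool
  | [] => true
  | [_] => true
  | a :: b :: t => (b == a + 1) && ok (b :: t)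

-- A's inner gap scan as a predicate on the index list
def bad (lst : List Int) : Bool :=
  (PySem.List.enumerate lst 0).any
    (fun q => !(decide (q.1 > (lst.length : Int) - 2)) &&
              !(decide (q.2 + 1 = PySem.List.pyGetD lst (q.1 + 1) 0)))

-- A's first loop (the grouping dict), as a named function for the proofs
def dictA (l : List Char) : PySem.Dict Char (List Int) :=
  (PySem.List.enumerate l 0).foldl
    (fun d p =>
      match d.get? p.2 with
      | some lst => d.insert p.2 (lst ++ [p.1])
      | none     => d.insert p.2 [p.1])
    PySem.Dict.empty

-- B's loop step and state, as named functions for the proofs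
def stepB (st : PySem.Dict Char Int × PySem.Set Char) (p : Int × Char) :
    PySem.Dict Char Int × PySem.Set Char :=
  let loner := if st.1.contains p.2 ∧ p.1 ≠ st.1.getD p.2 0 + 1
               then PySem.Set.add st.2 p.2 else st.2
  (st.1.insert p.2 p.1, loner)

def stateB (l : List Char) : PySem.Dict Char Int × PySem.Set Char :=
  (PySem.List.enumerate l 0).foldl stepB (PySem.Dict.empty, PySem.Set.empty)

lemma occ_append (l : List Char) (a c : Char) :
    occ (l ++ [a]) c = occ l c ++ (if a = c then [(l.length : Int)] else []) := by
  simp only [occ, PySem.List.enumerate_append, List.filter_append, List.map_append]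
  congr 1
  by_cases h : a = c <;> simp [PySem.List.enumerate, h]

lemma occ_ne_nil_iff (l : List Char) (c : Char) : occ l c ≠ [] ↔ c ∈ l := by
  simp only [occ, ne_eq, List.map_eq_nil_iff, List.filter_eq_nil_iff]
  push Not
  constructor
  · rintro ⟨p, hp, h⟩
    rw [PySem.List.mem_enumerate_iff] at hp
    obtain ⟨k, hk, rfl⟩ := hp
    simp only [beq_iff_eq] at h
    exact h ▸ List.getElem_mem hk
  · intro h
    obtain ⟨k, hk, rfl⟩ := List.mem_iff_getElem.mp h
    exact ⟨(0 + k, l[k]), (PySem.List.mem_enumerate_iff l 0 _).mpr ⟨k, hk, rfl⟩, by simp⟩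

lemma ok_append (lst : List Int) (x : Int) :
    ok (lst ++ [x]) = (ok lst && lst.getLast?.all (fun a => a + 1 == x)) := by
  induction lst with
  | nil => simp [ok]
  | cons a t ih =>
    cases t with
    | nil =>
      simp [ok]
      by_cases h : a + 1 = x
      · simp [h]
      · simp [h]; omega
    | cons b t' =>
      simp only [List.cons_append, ok, List.getLast?_cons_cons, Bool.and_assoc]
      rw [← List.cons_append, ih]

lemma ok_eq_false_iff (lst : List Int) :
    ok lst = false ↔ ∃ k, ∃ h : k + 1 < lst.length, lst[k] + 1 ≠ lst[k+1] := by
  induction lst with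
  | nil => simp [ok]
  | cons a t ih =>
    cases t with
    | nil => simp [ok]
    | cons b t' =>
      rw [show ok (a :: b :: t') = ((b == a + 1) && ok (b :: t')) from rfl]
      simp only [Bool.and_eq_false_iff, beq_eq_false_iff_ne, ne_eq, ih]
      constructor
      · rintro (h | ⟨k, hk, h⟩)
        · exact ⟨0, by simp, by simpa using fun hh => h hh.symm⟩
        · exact ⟨k + 1, by simpa using hk, by simpa using h⟩
      · rintro ⟨k, hk, h⟩
        cases k with
        | zero => left; simpa using fun hh => h hh.symm
        | succ k => right; exact ⟨k, by simpa using hk, by simpa using h⟩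

lemma bad_eq_true_iff (lst : List Int) :
    bad lst = true ↔ ∃ k, ∃ h : k + 1 < lst.length, lst[k] + 1 ≠ lst[k+1] := by
  simp only [bad, List.any_eq_true]
  constructor
  · rintro ⟨q, hq, hcond⟩
    rw [PySem.List.mem_enumerate_iff] at hq
    obtain ⟨k, hk, rfl⟩ := hq
    simp only [zero_add, Bool.and_eq_true, Bool.not_eq_true', decide_eq_false_iff_not, not_lt] at hcond
    obtain ⟨hle, hne⟩ := hcond
    have hk1 : k + 1 < lst.length := by omega
    refine ⟨k, hk1, ?_⟩
    rw [show ((k : Int) + 1) = ((k + 1 : Nat) : Int) by push_cast; ring,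
        PySem.List.pyGetD_natCast, List.getD_eq_getElem _ _ hk1] at hne
    exact hne
  · rintro ⟨k, hk1, hne⟩
    have hk : k < lst.length := by omega
    refine ⟨(0 + (k : Int), lst[k]), (PySem.List.mem_enumerate_iff lst 0 _).mpr ⟨k, hk, rfl⟩, ?_⟩
    simp only [zero_add, Bool.and_eq_true, Bool.not_eq_true', decide_eq_false_iff_not, not_lt]
    constructor
    · omega
    · rw [show ((k : Int) + 1) = ((k + 1 : Nat) : Int) by push_cast; ring,
          PySem.List.pyGetD_natCast, List.getD_eq_getElem _ _ hk1]
      exact hne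

lemma set_add_nodup {α : Type} [BEq α] [LawfulBEq α] (s : PySem.Set α) (c : α)
    (h : s.Nodup) : (PySem.Set.add s c).Nodup := by
  simp only [PySem.Set.add]
  split_ifs with h1
  · exact h
  · have h1' : c ∉ s := by simpa using h1
    rw [List.nodup_append]
    refine ⟨h, List.nodup_singleton c, ?_⟩
    intro a ha b hb
    simp only [List.mem_singleton] at hb
    exact fun he => h1' (hb ▸ he ▸ ha)

lemma set_add_fresh {α : Type} [BEq α] [LawfulBEq α] (s : PySem.Set α) (c : α)
    (h : c ∉ s) : PySem.Set.add s c = s ++ [c] := by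
  simp only [PySem.Set.add]
  rw [if_neg]
  simpa using h

lemma foldl_guard_add {β : Type} (G N : β → Prop) [DecidablePred G] [DecidablePred N]
    (xs : List β) (st : PySem.Set Char) (c : Char) :
    xs.foldl (fun st2 q => if G q then st2 else if N q then PySem.Set.add st2 c else st2) st
    = if xs.any (fun q => !(decide (G q)) && decide (N q)) then PySem.Set.add st c else st := by
  induction xs generalizing st with
  | nil => simp
  | cons q xs ih =>
    simp only [List.foldl_cons, List.any_cons]
    by_cases hG : G q
    · simp [hG, ih]
    · by_cases hN : N q
      · simp [hG, hN, ih]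
      · simp [hG, hN, ih]

lemma inner_fold_eq (lst : List Int) (c : Char) (st : PySem.Set Char) :
    (PySem.List.enumerate lst 0).foldl
      (fun st2 q =>
        if q.1 > (lst.length : Int) - 2 then st2
        else if q.2 + 1 ≠ PySem.List.pyGetD lst (q.1 + 1) 0 then PySem.Set.add st2 c
        else st2) st
    = if bad lst then PySem.Set.add st c else st := by
  refine (foldl_guard_add (fun q => q.1 > (lst.length : Int) - 2)
      (fun q => q.2 + 1 ≠ PySem.List.pyGetD lst (q.1 + 1) 0)
      (PySem.List.enumerate lst 0) st c).trans ?_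
  simp only [decide_not]
  rfl

lemma bad_eq_not_ok (lst : List Int) : bad lst = !(ok lst) := by
  rcases hok : ok lst with _ | _
  · simp only [Bool.not_false]
    exact (bad_eq_true_iff lst).mpr ((ok_eq_false_iff lst).mp hok)
  · simp only [Bool.not_true]
    rcases hb : bad lst with _ | _
    · rfl
    · exfalso
      have := (ok_eq_false_iff lst).mpr ((bad_eq_true_iff lst).mp hb)
      rw [hok] at this; simp at this

lemma cond_eq (lst : List Int) :
    (!((lst.length : Int) == 1) && bad lst) = !(ok lst) := by
  rw [bad_eq_not_ok]
  match lst with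
  | [] => simp [ok]
  | [x] => simp [ok]
  | a :: b :: t =>
    have h2 : (!(((a :: b :: t).length : Int) == 1)) = true := by
      simp only [Bool.not_eq_true', beq_eq_false_iff_ne, ne_eq, List.length_cons]
      push_cast; omega
    rw [h2, Bool.true_and]

lemma filter_map_fst {α β : Type} (items : List (α × β)) (C : α × β → Bool) (C' : α → Bool)
    (h : ∀ pr ∈ items, C pr = C' pr.1) :
    (items.filter C).map (fun p => p.1) = (items.map (fun p => p.1)).filter C' := by
  induction items with
  | nil => rfl
  | cons pr items ih =>
    have hpr := h pr (by simp)
    have hrest : ∀ p ∈ items, C p = C' p.1 := fun p hp => h p (by simp [hp])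
    simp only [List.filter_cons, List.map_cons, hpr]
    rcases hC : C' pr.1 <;> simp [ih hrest]

lemma outer_fold_eq (items : List (Char × List Int)) (st : PySem.Set Char)
    (hfresh : ∀ pr ∈ items, pr.1 ∉ st) (hnd : (items.map (fun p => p.1)).Nodup) :
    items.foldl
      (fun st pr =>
        if (pr.2.length : Int) = 1 then st
        else
          (PySem.List.enumerate pr.2 0).foldl
            (fun st2 q =>
              if q.1 > (pr.2.length : Int) - 2 then st2
              else if q.2 + 1 ≠ PySem.List.pyGetD pr.2 (q.1 + 1) 0 then PySem.Set.add st2 pr.1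
              else st2) st) st
    = st ++ (items.filter (fun pr => !((pr.2.length : Int) == 1) && bad pr.2)).map (fun p => p.1) := by
  induction items generalizing st with
  | nil => simp
  | cons pr items ih =>
    simp only [List.map_cons, List.nodup_cons] at hnd
    simp only [List.foldl_cons, List.filter_cons]
    rw [inner_fold_eq]
    by_cases h1 : ((pr.2.length : Int) = 1)
    · have hc : (!((pr.2.length : Int) == 1) && bad pr.2) = false := by simp [h1]
      rw [if_pos h1, hc]
      simp only [Bool.false_eq_true, if_false]
      exact ih st (fun p hp => hfresh p (by simp [hp])) hnd.2
    · by_cases hb : bad pr.2 = true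
      · have hlen : (!((pr.2.length : Int) == 1)) = true := by simp [h1]
        rw [if_neg h1, hb]
        simp only [Bool.and_true, hlen, if_true]
        rw [set_add_fresh st pr.1 (hfresh pr (by simp)),
            ih (st ++ [pr.1]) (fun p hp => by
              simp only [List.mem_append, List.mem_singleton]
              rintro (hin | heq)
              · exact hfresh p (by simp [hp]) hin
              · exact hnd.1 (List.mem_map.mpr ⟨p, hp, heq⟩)) hnd.2]
        simp
      · rw [if_neg h1, Bool.eq_false_iff.mpr hb]
        simp only [Bool.and_false, Bool.false_eq_true, if_false]
        exact ih st (fun p hp => hfresh p (by simp [hp])) hnd.2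

lemma dictA_eq_modify (l : List Char) :
    dictA l = ((PySem.List.enumerate l 0).map (fun p => (p.2, p.1))).foldl
      (fun d q => d.modify q.1 [] (fun v => v ++ [q.2])) PySem.Dict.empty := by
  rw [List.foldl_map, dictA]
  congr 1
  funext d p
  simp only [PySem.Dict.modify, PySem.Dict.getD]
  cases h : d.get? p.2 <;> simp

lemma getD_dictA (l : List Char) (c : Char) : (dictA l).getD c [] = occ l c := by
  rw [dictA_eq_modify, PySem.Dict.getD_foldl_modify_append]
  simp only [PySem.Dict.getD_empty, List.nil_append, occ]
  rw [List.filter_map]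
  simp only [List.map_map]
  rfl

lemma keys_dictA (l : List Char) : (dictA l).keys = PySem.Set.ofList l := by
  rw [dictA_eq_modify]
  have h := PySem.Dict.keys_foldl_modify_key
      (l := (PySem.List.enumerate l 0).map (fun p => (p.2, p.1)))
      (key := fun q => q.1) (d0 := ([] : List Int))
      (f := fun _ q v => v ++ [q.2]) (d := PySem.Dict.empty)
  simp only [List.map_map] at h
  rw [h, show (List.map ((fun q => q.1) ∘ fun p => (p.2, p.1)) (PySem.List.enumerate l 0))
       = List.map (fun p => p.2) (PySem.List.enumerate l 0) from rfl,
     PySem.List.map_snd_enumerate]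
  rfl

lemma keys_eq_items_map_fst {κ ν : Type} [BEq κ] (d : PySem.Dict κ ν) :
    d.keys = d.items.map (fun p => p.1) := rfl

lemma lonerA_eq (l : List Char) :
    (dictA l).items.foldl
      (fun st pr =>
        if (pr.2.length : Int) = 1 then st
        else
          (PySem.List.enumerate pr.2 0).foldl
            (fun st2 q =>
              if q.1 > (pr.2.length : Int) - 2 then st2
              else if q.2 + 1 ≠ PySem.List.pyGetD pr.2 (q.1 + 1) 0 then PySem.Set.add st2 pr.1
              else st2) st) PySem.Set.empty
    = (PySem.Set.ofList l).filter (fun c => !(ok (occ l c))) := by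
  have hnd : ((dictA l).items.map (fun p => p.1)).Nodup := by
    rw [← keys_eq_items_map_fst, keys_dictA]
    exact PySem.Set.nodup_ofList l
  rw [outer_fold_eq _ _ (by intro pr _ hm; simp [PySem.Set.empty] at hm) hnd]
  rw [show (PySem.Set.empty : PySem.Set Char) = [] from rfl, List.nil_append]
  rw [filter_map_fst _ _ (fun c => !(ok (occ l c))) ?_]
  · rw [← keys_eq_items_map_fst, keys_dictA]
  · intro pr hpr
    have hget : (dictA l).get? pr.1 = some pr.2 :=
      PySem.Dict.get?_of_mem_items _ hpr (by rw [keys_dictA]; exact PySem.Set.nodup_ofList l)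
    have hval : pr.2 = occ l pr.1 := by
      have := getD_dictA l pr.1
      rw [PySem.Dict.getD_eq_get?_getD, hget] at this
      exact this
    rw [hval, cond_eq]

lemma stateB_append (l : List Char) (a : Char) :
    stateB (l ++ [a]) = stepB (stateB l) ((l.length : Int), a) := by
  simp [stateB, PySem.List.enumerate_append, PySem.List.enumerate]

lemma stateB_fst (l : List Char) (c : Char) :
    (stateB l).1.get? c = (occ l c).getLast? := by
  induction l using List.reverseRecOn with
  | nil => simp [stateB, PySem.List.enumerate, occ, PySem.Dict.get?_empty]
  | append_singleton l a ih =>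
    rw [stateB_append, occ_append]
    by_cases h : a = c
    · subst h
      simp [stepB, PySem.Dict.get?_insert_self]
    · have hne : c ≠ a := fun he => h he.symm
      simp only [stepB]
      rw [PySem.Dict.get?_insert_of_ne _ _ hne]
      simp [h, ih]

lemma stateB_snd_nodup (l : List Char) : (stateB l).2.Nodup := by
  induction l using List.reverseRecOn with
  | nil => simp [stateB, PySem.List.enumerate, PySem.Set.empty]
  | append_singleton l a ih =>
    rw [stateB_append]
    simp only [stepB]
    split_ifs with h
    · exact set_add_nodup _ _ ih
    · exact ih

lemma stateB_snd_mem (l : List Char) (c : Char) :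
    c ∈ (stateB l).2 ↔ ok (occ l c) = false := by
  induction l using List.reverseRecOn with
  | nil => simp [stateB, PySem.List.enumerate, PySem.Set.empty, occ, ok]
  | append_singleton l a ih =>
    have hcont : (stateB l).1.contains a = true ↔ occ l a ≠ [] := by
      rw [PySem.Dict.contains_eq_isSome_get?, stateB_fst, Option.isSome_iff_ne_none,
          ne_eq, List.getLast?_eq_none_iff]
    by_cases h : a = c
    · subst h
      rw [stateB_append, occ_append, if_pos rfl, ok_append]
      by_cases hocc : occ l a = []
      · have hcf : ¬ ((stateB l).1.contains a = true ∧ (l.length : Int) ≠ (stateB l).1.getD a 0 + 1) := by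
          rintro ⟨hc, -⟩; exact (hcont.mp hc) hocc
        simp only [stepB, if_neg hcf]
        rw [ih, hocc]
        simp [ok]
      · obtain ⟨last, hlast⟩ : ∃ x, (occ l a).getLast? = some x :=
          Option.isSome_iff_exists.mp (by
            rw [Option.isSome_iff_ne_none, ne_eq, List.getLast?_eq_none_iff]; exact hocc)
        have hgetD : (stateB l).1.getD a 0 = last := by
          rw [PySem.Dict.getD_eq_get?_getD, stateB_fst, hlast]; rfl
        have hall : (occ l a).getLast?.all (fun x => x + 1 == (l.length : Int))
                  = (last + 1 == (l.length : Int)) := by rw [hlast]; rfl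
        by_cases hlen : (l.length : Int) = last + 1
        · have hcf : ¬ ((stateB l).1.contains a = true ∧ (l.length : Int) ≠ (stateB l).1.getD a 0 + 1) := by
            rintro ⟨-, hne⟩; rw [hgetD] at hne; exact hne hlen
          simp only [stepB, if_neg hcf]
          rw [ih, hall]
          simp [hlen.symm]
        · have hct : ((stateB l).1.contains a = true ∧ (l.length : Int) ≠ (stateB l).1.getD a 0 + 1) :=
            ⟨hcont.mpr hocc, by rw [hgetD]; exact hlen⟩
          simp only [stepB, if_pos hct]
          rw [PySem.Set.mem_add, hall]
          have hfalse : (last + 1 == (l.length : Int)) = false := by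
            simp only [beq_eq_false_iff_ne, ne_eq]; exact fun he => hlen he.symm
          rw [hfalse]
          simp
    · rw [stateB_append, occ_append, if_neg h, List.append_nil]
      simp only [stepB]
      split_ifs with hcnd
      · rw [PySem.Set.mem_add, ih]
        constructor
        · rintro (hm | rfl)
          · exact hm
          · exact absurd rfl h
        · exact Or.inl
      · exact ih

lemma loner_perm (l : List Char) :
    ((PySem.Set.ofList l).filter (fun c => !(ok (occ l c)))).Perm (stateB l).2 := by
  rw [List.perm_ext_iff_of_nodup (List.Nodup.filter _ (PySem.Set.nodup_ofList l))
      (stateB_snd_nodup l)]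
  intro c
  rw [List.mem_filter, stateB_snd_mem, PySem.Set.mem_ofList]
  constructor
  · rintro ⟨-, hok⟩
    simpa using hok
  · intro hok
    refine ⟨?_, by simpa using hok⟩
    rw [← occ_ne_nil_iff]
    intro hnil
    rw [hnil] at hok
    simp [ok] at hok

lemma join_eq (total : Int) (xs : List Char) (k : Int) (acc : List Char)
    (h : total = k + xs.length) :
    solutionJoin total (PySem.List.enumerate xs k) acc
    = if xs = [] then "N" else String.ofList (acc ++ xs) := by
  induction xs generalizing k acc with
  | nil => simp [PySem.List.enumerate, solutionJoin]
  | cons x t ih =>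
    rw [PySem.List.enumerate_cons]
    simp only [solutionJoin]
    by_cases ht : t = []
    · subst ht
      have hk : k = total - 1 := by simp at h; omega
      simp [hk]
    · have hk : ¬ (k = total - 1) := by
        simp at h
        have htl : 0 < t.length := List.length_pos_iff.mpr ht
        omega
      rw [if_neg hk, ih (k + 1) (acc ++ [x]) (by simp at h ⊢; omega)]
      rw [if_neg ht]
      simp

-- ===== VERDICT (by name: the statement is the Claim_ definition above) =====
theorem solution_spec : Claim_equal_solution := by
  intro s _
  unfold Spec_solution
  show solution s = solution_alt s
  set l := s.toList with hl
  have eA : solution s =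
      solutionJoin (((PySem.List.sorted
          ((dictA l).items.foldl
            (fun st pr =>
              if (pr.2.length : Int) = 1 then st
              else
                (PySem.List.enumerate pr.2 0).foldl
                  (fun st2 q =>
                    if q.1 > (pr.2.length : Int) - 2 then st2
                    else if q.2 + 1 ≠ PySem.List.pyGetD pr.2 (q.1 + 1) 0 then PySem.Set.add st2 pr.1
                    else st2) st) PySem.Set.empty)
          (fun x => x) false).length : Nat) : Int)
        (PySem.List.enumerate (PySem.List.sorted
          ((dictA l).items.foldl
            (fun st pr =>
              if (pr.2.length : Int) = 1 then st
              else
                (PySem.List.enumerate pr.2 0).foldl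
                  (fun st2 q =>
                    if q.1 > (pr.2.length : Int) - 2 then st2
                    else if q.2 + 1 ≠ PySem.List.pyGetD pr.2 (q.1 + 1) 0 then PySem.Set.add st2 pr.1
                    else st2) st) PySem.Set.empty)
          (fun x => x) false) 0) [] := rfl
  have eB : solution_alt s =
      (if (stateB l).2 = [] then "N"
       else String.ofList (PySem.List.sorted (stateB l).2 (fun x => x) false)) := rfl
  rw [eA, eB, lonerA_eq l]
  set S := (PySem.Set.ofList l).filter (fun c => !(ok (occ l c))) with hS
  set sortedA := PySem.List.sorted S (fun x => x) false with hsA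
  rw [join_eq _ _ 0 [] (by ring)]
  have hperm : S.Perm (stateB l).2 := loner_perm l
  have hsorted : sortedA = PySem.List.sorted (stateB l).2 (fun x => x) false :=
    PySem.List.sorted_eq_sorted_of_perm _ _ _ (fun a b h => h) hperm
  by_cases hempty : S = []
  · have hB : (stateB l).2 = [] := (hempty ▸ hperm).symm.eq_nil
    rw [if_pos (by rw [hsA, PySem.List.sorted_eq_nil_iff]; exact hempty), if_pos hB]
  · have hB : (stateB l).2 ≠ [] := by
      intro hn
      exact hempty (hperm.trans (hn ▸ List.Perm.refl _)).eq_nil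
    rw [if_neg (by rw [hsA, PySem.List.sorted_eq_nil_iff]; exact hempty), if_neg hB,
        List.nil_append, hsorted]
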